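-- pv_equiv track=rewrite | github.com/1438723338/SwiftDP | autodatapre/Pipeline_Generation/MetaDataUpdater.py | complete_pipeline
-- ===== SOURCE A (Python) =====
-- default_pipeline = {
--     "Imputation": 'imp_null',
--     "Encoding": 'enc_null',
--     "Normalization": 'nor_null',
--     "Feature Selection": 'fea_null',
--     "Duplication": 'dup_null',
--     "Outlier Exclusion": 'out_null',
--     "Classification": 'cla_null'
-- }
--
-- list1 = ['RAND', 'MF', 'MICE', 'KNN', 'EM', 'MEDIAN', 'MEAN', 'DROP']   # Imputation
--
-- list2 = ['OE', 'BE', 'FE', 'CBE', 'LE']                                 # Encoding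
--
-- list3 = ['ZS', 'DS', 'MM']                                              # Normalization
--
-- list4 = ['MR', 'WR', 'LC', 'TB']                                        # Feature Selection
--
-- list5 = ['ED', 'AD']                                                    # Duplication
--
-- list6 = ['ZSB', 'IQR', 'LOF']                                           # Outlier Exclusion
--
-- list7 = ['NB', 'LDA', 'RF', 'LR']                                       # Classification
--
-- def complete_pipeline(raw_pipeline):
--     # 创建一个包含默认值的 pipeline
--     complete_pipeline = default_pipeline.copy()
--
--     # 遍历每个给定的原始步骤
--     for step in raw_pipeline:
--         # 根据步骤所在的列表来确定它属于哪一类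
--         if step in list1:
--             complete_pipeline["Imputation"] = step
--         elif step in list2:
--             complete_pipeline["Encoding"] = step
--         elif step in list3:
--             complete_pipeline["Normalization"] = step
--         elif step in list4:
--             complete_pipeline["Feature Selection"] = step
--         elif step in list5:
--             complete_pipeline["Duplication"] = step
--         elif step in list6:
--             complete_pipeline["Outlier Exclusion"] = step
--         elif step in list7:
--             complete_pipeline["Classification"] = step
--
--     # 返回按顺序的完整 pipeline
--     return [
--         complete_pipeline["Imputation"],
--         complete_pipeline["Encoding"],
--         complete_pipeline["Normalization"],
--         complete_pipeline["Feature Selection"],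
--         complete_pipeline["Duplication"],
--         complete_pipeline["Outlier Exclusion"],
--         complete_pipeline["Classification"]
--     ]
-- ===== SOURCE B (Python) =====
-- # B: per-slot backward scan — for each of the seven fixed slots, take the last
-- # step of raw_pipeline belonging to that slot's category, else the default.
-- _SLOTS = [
--     ('imp_null', frozenset(['RAND', 'MF', 'MICE', 'KNN', 'EM', 'MEDIAN', 'MEAN', 'DROP'])),
--     ('enc_null', frozenset(['OE', 'BE', 'FE', 'CBE', 'LE'])),
--     ('nor_null', frozenset(['ZS', 'DS', 'MM'])),
--     ('fea_null', frozenset(['MR', 'WR', 'LC', 'TB'])),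
--     ('dup_null', frozenset(['ED', 'AD'])),
--     ('out_null', frozenset(['ZSB', 'IQR', 'LOF'])),
--     ('cla_null', frozenset(['NB', 'LDA', 'RF', 'LR'])),
-- ]
--
-- def complete_pipeline(raw_pipeline):
--     rev = list(reversed(raw_pipeline))
--     return [next((s for s in rev if s in cat), default) for default, cat in _SLOTS]
-- ===== Notes on version B (the rewrite author's own statement) =====
-- stated objective: simpler
-- what changed: A dispatches each step through a 7-way elif membership cascade into a mutable dict and reads the slots back; B drops the cascade and the dict entirely and instead scans the reversed pipeline once per slot, taking the last step of that slot's category (frozenset membership) or its default.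
import Mathlib
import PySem

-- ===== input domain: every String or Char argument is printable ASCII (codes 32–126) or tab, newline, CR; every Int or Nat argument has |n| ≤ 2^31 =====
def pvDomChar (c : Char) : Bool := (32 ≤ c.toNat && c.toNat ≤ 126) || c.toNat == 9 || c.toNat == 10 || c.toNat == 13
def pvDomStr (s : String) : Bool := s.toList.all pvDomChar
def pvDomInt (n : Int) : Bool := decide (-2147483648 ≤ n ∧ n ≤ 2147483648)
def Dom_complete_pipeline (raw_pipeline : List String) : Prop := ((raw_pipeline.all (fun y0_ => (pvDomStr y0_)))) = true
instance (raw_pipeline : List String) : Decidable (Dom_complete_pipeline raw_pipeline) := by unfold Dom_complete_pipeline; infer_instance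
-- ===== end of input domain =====

-- B replaces A's per-step 7-way elif dispatch into a dict by a per-slot backward
-- scan (last matching step of each category, else the default); objective: simpler.

-- ===== PORT A =====
def list1 : List String := ["RAND", "MF", "MICE", "KNN", "EM", "MEDIAN", "MEAN", "DROP"]
def list2 : List String := ["OE", "BE", "FE", "CBE", "LE"]
def list3 : List String := ["ZS", "DS", "MM"]
def list4 : List String := ["MR", "WR", "LC", "TB"]
def list5 : List String := ["ED", "AD"]
def list6 : List String := ["ZSB", "IQR", "LOF"]
def list7 : List String := ["NB", "LDA", "RF", "LR"]

def default_pipeline : PySem.Dict String String :=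
  PySem.Dict.ofList
    [("Imputation", "imp_null"), ("Encoding", "enc_null"), ("Normalization", "nor_null"),
     ("Feature Selection", "fea_null"), ("Duplication", "dup_null"),
     ("Outlier Exclusion", "out_null"), ("Classification", "cla_null")]

-- the body of A's for-loop (the elif cascade)
def cpStep (d : PySem.Dict String String) (step : String) : PySem.Dict String String :=
  if step ∈ list1 then d.insert "Imputation" step
  else if step ∈ list2 then d.insert "Encoding" step
  else if step ∈ list3 then d.insert "Normalization" step
  else if step ∈ list4 then d.insert "Feature Selection" step
  else if step ∈ list5 then d.insert "Duplication" step
  else if step ∈ list6 then d.insert "Outlier Exclusion" step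
  else if step ∈ list7 then d.insert "Classification" step
  else d

-- final dict lookups never miss (all seven keys are in default_pipeline), so getD is exact
def complete_pipeline (raw_pipeline : List String) : List String :=
  let d := raw_pipeline.foldl cpStep default_pipeline
  [d.getD "Imputation" "", d.getD "Encoding" "", d.getD "Normalization" "",
   d.getD "Feature Selection" "", d.getD "Duplication" "",
   d.getD "Outlier Exclusion" "", d.getD "Classification" ""]

-- ===== PORT B =====
-- next((s for s in rev if s in cat), default)
def slotVal (rev : List String) (cat : List String) (dflt : String) : String :=
  (rev.find? (fun s => decide (s ∈ cat))).getD dflt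

def complete_pipeline_alt (raw_pipeline : List String) : List String :=
  let rev := raw_pipeline.reverse
  [slotVal rev list1 "imp_null", slotVal rev list2 "enc_null", slotVal rev list3 "nor_null",
   slotVal rev list4 "fea_null", slotVal rev list5 "dup_null", slotVal rev list6 "out_null",
   slotVal rev list7 "cla_null"]

-- ===== PRECONDITION & SPEC =====
def Spec_complete_pipeline (raw_pipeline : List String) (out : List String) : Prop := out = complete_pipeline_alt raw_pipeline
instance (raw_pipeline : List String) (out : List String) : Decidable (Spec_complete_pipeline raw_pipeline out) := by unfold Spec_complete_pipeline; infer_instance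

-- ===== CLAIM (what is proved, stated in full; the proofs are below) =====
def Claim_equal_complete_pipeline : Prop := ∀ (raw_pipeline : List String), Dom_complete_pipeline raw_pipeline → Spec_complete_pipeline raw_pipeline (complete_pipeline raw_pipeline)

-- ===== LEMMAS AND PROOFS =====

-- what one loop-body application does to the "Imputation" slot
lemma step_slot_1 (d : PySem.Dict String String) (s : String) :
    (cpStep d s).getD "Imputation" "" = if s ∈ list1 then s else d.getD "Imputation" "" := by
  unfold cpStep
  split_ifs <;>
    first
      | rfl
      | rw [PySem.Dict.getD_insert_self]
      | rw [PySem.Dict.getD_insert_of_ne _ _ _ (by decide)]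

-- what one loop-body application does to the "Encoding" slot
lemma step_slot_2 (d : PySem.Dict String String) (s : String) :
    (cpStep d s).getD "Encoding" "" = if s ∈ list2 then s else d.getD "Encoding" "" := by
  unfold cpStep
  split_ifs <;>
    first
      | rfl
      | (rename_i ha hb; fin_cases ha <;> exact absurd hb (by decide))
      | rw [PySem.Dict.getD_insert_self]
      | rw [PySem.Dict.getD_insert_of_ne _ _ _ (by decide)]

-- what one loop-body application does to the "Normalization" slot
lemma step_slot_3 (d : PySem.Dict String String) (s : String) :
    (cpStep d s).getD "Normalization" "" = if s ∈ list3 then s else d.getD "Normalization" "" := by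
  unfold cpStep
  split_ifs <;>
    first
      | rfl
      | (rename_i ha hb; fin_cases ha <;> exact absurd hb (by decide))
      | rw [PySem.Dict.getD_insert_self]
      | rw [PySem.Dict.getD_insert_of_ne _ _ _ (by decide)]

-- what one loop-body application does to the "Feature Selection" slot
lemma step_slot_4 (d : PySem.Dict String String) (s : String) :
    (cpStep d s).getD "Feature Selection" "" = if s ∈ list4 then s else d.getD "Feature Selection" "" := by
  unfold cpStep
  split_ifs <;>
    first
      | rfl
      | (rename_i ha hb; fin_cases ha <;> exact absurd hb (by decide))
      | rw [PySem.Dict.getD_insert_self]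
      | rw [PySem.Dict.getD_insert_of_ne _ _ _ (by decide)]

-- what one loop-body application does to the "Duplication" slot
lemma step_slot_5 (d : PySem.Dict String String) (s : String) :
    (cpStep d s).getD "Duplication" "" = if s ∈ list5 then s else d.getD "Duplication" "" := by
  unfold cpStep
  split_ifs <;>
    first
      | rfl
      | (rename_i ha hb; fin_cases ha <;> exact absurd hb (by decide))
      | rw [PySem.Dict.getD_insert_self]
      | rw [PySem.Dict.getD_insert_of_ne _ _ _ (by decide)]

-- what one loop-body application does to the "Outlier Exclusion" slot
lemma step_slot_6 (d : PySem.Dict String String) (s : String) :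
    (cpStep d s).getD "Outlier Exclusion" "" = if s ∈ list6 then s else d.getD "Outlier Exclusion" "" := by
  unfold cpStep
  split_ifs <;>
    first
      | rfl
      | (rename_i ha hb; fin_cases ha <;> exact absurd hb (by decide))
      | rw [PySem.Dict.getD_insert_self]
      | rw [PySem.Dict.getD_insert_of_ne _ _ _ (by decide)]

-- what one loop-body application does to the "Classification" slot
lemma step_slot_7 (d : PySem.Dict String String) (s : String) :
    (cpStep d s).getD "Classification" "" = if s ∈ list7 then s else d.getD "Classification" "" := by
  unfold cpStep
  split_ifs <;>
    first
      | rfl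
      | (rename_i ha hb; fin_cases ha <;> exact absurd hb (by decide))
      | rw [PySem.Dict.getD_insert_self]
      | rw [PySem.Dict.getD_insert_of_ne _ _ _ (by decide)]

-- A's left fold read at slot k equals the last step of the matching category (B's backward scan)
lemma foldl_getD (k dflt : String) (cat : List String)
    (hstep : ∀ d s, (cpStep d s).getD k dflt = if s ∈ cat then s else d.getD k dflt) :
    ∀ (raw : List String) (d : PySem.Dict String String),
      (raw.foldl cpStep d).getD k dflt
        = (raw.reverse.find? (fun s => decide (s ∈ cat))).getD (d.getD k dflt) := by
  intro raw
  induction raw with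
  | nil => intro d; simp
  | cons s rest ih =>
    intro d
    rw [List.foldl_cons, ih, List.reverse_cons, List.find?_append]
    cases hf : rest.reverse.find? (fun s => decide (s ∈ cat)) with
    | some t => simp
    | none =>
      simp only [Option.none_or, List.find?_cons, List.find?_nil, hstep]
      by_cases hm : s ∈ cat <;> simp [hm]

theorem complete_pipeline_spec : Claim_equal_complete_pipeline := by
  intro raw _
  unfold Spec_complete_pipeline complete_pipeline complete_pipeline_alt slotVal
  simp only [foldl_getD _ _ _ step_slot_1, foldl_getD _ _ _ step_slot_2, foldl_getD _ _ _ step_slot_3,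
      foldl_getD _ _ _ step_slot_4, foldl_getD _ _ _ step_slot_5, foldl_getD _ _ _ step_slot_6,
      foldl_getD _ _ _ step_slot_7]
  rfl
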